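-- pv_equiv track=rewrite | github.com/igorvanloo/Project-Euler-Explained | Finished Problems/pe00179 - Consecutive positive Divisors.py | compute
-- ===== SOURCE A (Python) =====
-- import time, math
--
-- def gpf_sieve(N):
--     #smallest prime factor sieve
--     gpf = [i for i in range(N + 1)]
--
--     for i in range(2, int(math.sqrt(N)) + 1):
--         if gpf[i] == i:
--             for j in range(i*i, N + 1, i):
--                 gpf[j] = i
--     return gpf
--
-- def compute(limit):
--     gpf = gpf_sieve(limit + 1)
--     d = gpf
--     for i in range(2, limit + 2):
--         if gpf[i] == i:
--             d[i] = 2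
--         else:
--             #We use the fatc that d_array[n] = (e + 1) * d_array[n/p^e]
--             p = gpf[i]
--             t = i // p
--             e = 2
--             while t % p == 0:
--                 e += 1
--                 t //= p
--             d[i] = d[t]*e
--     count = 0
--     for z in range(limit-1):
--         if d[z] == d[z+1]:
--             count += 1
--     return count
-- ===== SOURCE B (Python) =====
-- def compute(limit):
--     # Divisor sieve: d[j] = number of divisors of j, for 0 <= j < limit.
--     size = limit if limit > 0 else 0
--     d = [0] * size
--     for i in range(1, size):
--         for j in range(i, size, i):
--             d[j] += 1
--     count = 0
--     for z in range(limit - 1):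
--         if d[z] == d[z + 1]:
--             count += 1
--     return count
-- ===== Notes on version B (the rewrite author's own statement) =====
-- stated objective: simpler
-- what changed: Replaces the smallest-prime-factor sieve plus the multiplicative divisor-count recurrence (with an inner while-loop extracting prime powers) by a single classic divisor sieve that increments the count at every multiple of every candidate divisor; the final comparing pass is kept. Pre_ excludes limit <= -2, where A raises ValueError (math.sqrt of a negative number).
-- outside the precondition, e.g. on compute(-2): A raises ValueError, B returns 0
import Mathlib
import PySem

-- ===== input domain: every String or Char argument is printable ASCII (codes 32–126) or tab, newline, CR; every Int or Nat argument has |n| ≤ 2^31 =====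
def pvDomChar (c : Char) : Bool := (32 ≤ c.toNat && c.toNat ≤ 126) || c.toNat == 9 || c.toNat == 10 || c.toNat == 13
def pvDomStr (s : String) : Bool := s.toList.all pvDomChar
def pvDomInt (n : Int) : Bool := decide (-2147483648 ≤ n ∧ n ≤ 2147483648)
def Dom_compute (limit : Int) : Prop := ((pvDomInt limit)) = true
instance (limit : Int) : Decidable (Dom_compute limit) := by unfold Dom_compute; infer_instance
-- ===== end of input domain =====

-- B replaces A's smallest-prime-factor sieve + multiplicative divisor-count recurrence by a plain
-- divisor sieve (increment the count at every multiple of every candidate divisor); objective: simpler (not faster).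

-- ===== PORT A =====
-- list indexing/assignment gpf[k] = …, gpf[k]: every index in every execution of A is provably
-- nonnegative and in range, so the clamped total forms below are exact there (Python's negative-index
-- wrap and IndexError are never exercised); Array is used for O(1) in-place updates under evaluation.
def aget (a : Array Int) (i : Int) : Int := a.getD i.toNat 0
def aset (a : Array Int) (i : Int) (v : Int) : Array Int := a.setIfInBounds i.toNat v

-- int(math.sqrt(N)): exact for the 0 ≤ N ≤ 2^31+2 admitted by Dom_/Pre_ (a double sqrt of such N
-- cannot round across an integer); for N < 0 Python raises ValueError — those inputs are outside Pre_.
def pySqrtInt (N : Int) : Int := (Nat.sqrt N.toNat : Int)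

-- gpf = [i for i in range(N+1)]; for i in range(2, int(math.sqrt(N))+1): if gpf[i]==i: for j in range(i*i, N+1, i): gpf[j] = i
def gpfSieve (N : Int) : Array Int :=
  let gpf := (PySem.List.pyRange 0 (N + 1) 1).toArray
  (PySem.List.pyRange 2 (pySqrtInt N + 1) 1).foldl
    (fun gpf i =>
      if aget gpf i = i then
        (PySem.List.pyRange (i * i) (N + 1) i).foldl
          (fun g j => aset g j i) gpf
      else gpf) gpf

-- while t % p == 0: e += 1; t //= p  (the fuel only makes the loop total: wherever A runs it,
-- p ≥ 2 and t ≥ 1, so t.toNat + 1 steps always suffice and the result is the loop's exact result)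
def whileDiv : Nat → Int → Int → Int → Int × Int
  | 0, _, e, t => (e, t)
  | fuel + 1, p, e, t =>
    if PySem.Int.mod t p = 0 then whileDiv fuel p (e + 1) (PySem.Int.floordiv t p)
    else (e, t)

-- In Python 'd = gpf' aliases the same list object; the single fold state below is that shared list.
def compute (limit : Int) : Int :=
  let gpf := gpfSieve (limit + 1)
  let d := (PySem.List.pyRange 2 (limit + 2) 1).foldl
    (fun d i =>
      if aget d i = i then aset d i 2
      else
        let p := aget d i
        let t0 := PySem.Int.floordiv i p
        let et := whileDiv (t0.toNat + 1) p 2 t0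
        aset d i (aget d et.2 * et.1)) gpf
  (PySem.List.pyRange 0 (limit - 1) 1).foldl
    (fun count z =>
      if aget d z = aget d (z + 1) then count + 1 else count) 0

-- ===== PORT B =====
def compute_alt (limit : Int) : Int :=
  let size : Int := if limit > 0 then limit else 0
  let d0 : Array Int := Array.replicate size.toNat 0
  let d := (PySem.List.pyRange 1 size 1).foldl
    (fun d i =>
      (PySem.List.pyRange i size i).foldl
        (fun d j => aset d j (aget d j + 1)) d) d0
  (PySem.List.pyRange 0 (limit - 1) 1).foldl
    (fun count z =>
      if aget d z = aget d (z + 1) then count + 1 else count) 0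

-- ===== PRECONDITION & SPEC =====
-- Pre_ excludes exactly limit ≤ -2, where A raises ValueError (math.sqrt of the negative limit+1).
def Pre_compute (limit : Int) : Prop := -1 ≤ limit
instance (limit : Int) : Decidable (Pre_compute limit) := by unfold Pre_compute; infer_instance
def pvWitness_compute : Int := 10

def Spec_compute (limit : Int) (out : Int) : Prop := out = compute_alt limit
instance (limit : Int) (out : Int) : Decidable (Spec_compute limit out) := by unfold Spec_compute; infer_instance

-- ===== CLAIM (what is proved, stated in full; the proofs are below) =====
def Claim_equal_compute : Prop := ∀ (limit : Int), Dom_compute limit → Pre_compute limit → Spec_compute limit (compute limit)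

-- ===== LEMMAS AND PROOFS =====

-- list shadows of the ports' clamped array get/set, for the invariant proofs
def lget (d : List Int) (i : Int) : Int := d.getD i.toNat 0
def lset (d : List Int) (i : Int) (v : Int) : List Int := d.set i.toNat v

lemma lget_def (d : List Int) (i : Int) : lget d i = d.getD i.toNat 0 := rfl
lemma lset_def (d : List Int) (i : Int) (v : Int) : lset d i v = d.set i.toNat v := rfl

lemma aget_toList (a : Array Int) (i : Int) : aget a i = lget a.toList i := by
  simp only [aget, lget, Array.getD, List.getD]
  split_ifs with h
  · simp [h]
  · simp [List.getElem?_eq_none (by simpa using Nat.le_of_not_lt h : a.toList.length ≤ i.toNat)]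

lemma aset_toList (a : Array Int) (i : Int) (v : Int) :
    (aset a i v).toList = lset a.toList i v := by
  simp [aset, lset]

lemma foldl_toList (l : List Int) (fA : Array Int → Int → Array Int)
    (fL : List Int → Int → List Int)
    (h : ∀ (a : Array Int), ∀ x ∈ l, (fA a x).toList = fL a.toList x) :
    ∀ a : Array Int, (l.foldl fA a).toList = l.foldl fL a.toList := by
  induction l with
  | nil => intro a; rfl
  | cons x l ih =>
    intro a
    rw [List.foldl_cons, List.foldl_cons,
      ih (fun a y hy => h a y (List.mem_cons_of_mem x hy)), h a x (by simp)]

def gpfSieveL (N : Int) : List Int :=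
  let gpf := PySem.List.pyRange 0 (N + 1) 1
  (PySem.List.pyRange 2 (pySqrtInt N + 1) 1).foldl
    (fun gpf i =>
      if lget gpf i = i then
        (PySem.List.pyRange (i * i) (N + 1) i).foldl
          (fun g j => lset g j i) gpf
      else gpf) gpf

def sieveStep (N : Int) : List Int → Int → List Int :=
  fun gpf i =>
    if lget gpf i = i then
      (PySem.List.pyRange (i * i) (N + 1) i).foldl (fun g j => lset g j i) gpf
    else gpf

lemma gpfSieve_toList (N : Int) : (gpfSieve N).toList = gpfSieveL N := by
  unfold gpfSieve gpfSieveL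
  have hstep : ∀ (a : Array Int), ∀ x ∈ PySem.List.pyRange 2 (pySqrtInt N + 1) 1,
      (if aget a x = x then
          (PySem.List.pyRange (x * x) (N + 1) x).foldl (fun g j => aset g j x) a
        else a).toList = sieveStep N a.toList x := by
    intro a x _
    unfold sieveStep
    simp only [aget_toList]
    by_cases hg : lget a.toList x = x
    · rw [if_pos hg, if_pos hg]
      exact foldl_toList _ _ _ (fun b y _ => aset_toList b y x) a
    · rw [if_neg hg, if_neg hg]
  rw [foldl_toList _ _ (sieveStep N) hstep, List.toList_toArray]
  rfl

lemma getD_set_eq (d : List Int) (n j : Nat) (v : Int) :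
    (d.set n v).getD j 0 = if j = n ∧ j < d.length then v else d.getD j 0 := by
  rcases Nat.lt_or_ge j d.length with hj | hj
  · by_cases h : j = n
    · subst h; simp [List.getD, hj]
    · simp [List.getD, List.getElem?_set_ne (fun he => h he.symm), h]
  · have h1 : (d.set n v)[j]? = none := List.getElem?_eq_none (by simpa using hj)
    have h2 : d[j]? = none := List.getElem?_eq_none hj
    have : ¬ (j = n ∧ j < d.length) := fun h => absurd h.2 (by omega)
    simp [List.getD, h1, h2, this]

lemma foldl_setconst_length (l : List Int) (v : Int) (d : List Int) :
    (l.foldl (fun g x => lset g x v) d).length = d.length := by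
  induction l generalizing d with
  | nil => rfl
  | cons a l ih => rw [List.foldl_cons, ih, lset_def, List.length_set]

lemma foldl_setconst_getD (l : List Int) (v : Int) (d : List Int) (j : Nat)
    (h0 : ∀ x ∈ l, 0 ≤ x) :
    (l.foldl (fun g x => lset g x v) d).getD j 0
      = if (j : Int) ∈ l ∧ j < d.length then v else d.getD j 0 := by
  induction l generalizing d with
  | nil => simp
  | cons a l ih =>
    have ha : 0 ≤ a := h0 a (by simp)
    rw [List.foldl_cons, ih _ (fun x hx => h0 x (by simp [hx])),
      lset_def, List.length_set, getD_set_eq]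
    by_cases hj : (j : Int) ∈ l ∧ j < d.length
    · rw [if_pos hj, if_pos ⟨List.mem_cons_of_mem a hj.1, hj.2⟩]
    · rw [if_neg hj]
      by_cases hja : j = a.toNat ∧ j < d.length
      · rw [if_pos hja, if_pos ⟨List.mem_cons.2 (Or.inl (by omega)), hja.2⟩]
      · rw [if_neg hja, if_neg (by
          rintro ⟨hm, hlen⟩
          rcases List.mem_cons.1 hm with h | h
          · exact hja ⟨by omega, hlen⟩
          · exact hj ⟨h, hlen⟩)]

lemma foldl_incr_length (l : List Int) (d : List Int) :
    (l.foldl (fun d x => lset d x (lget d x + 1)) d).length = d.length := by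
  induction l generalizing d with
  | nil => rfl
  | cons a l ih => rw [List.foldl_cons, ih, lset_def, List.length_set]

lemma foldl_incr_getD (l : List Int) (d : List Int) (j : Nat)
    (h0 : ∀ x ∈ l, 0 ≤ x) (hnd : l.Nodup) :
    (l.foldl (fun d x => lset d x (lget d x + 1)) d).getD j 0
      = d.getD j 0 + (if (j : Int) ∈ l ∧ j < d.length then 1 else 0) := by
  induction l generalizing d with
  | nil => simp
  | cons a l ih =>
    have ha : 0 ≤ a := h0 a (by simp)
    have hanl : a ∉ l := (List.nodup_cons.1 hnd).1
    rw [List.foldl_cons, ih _ (fun x hx => h0 x (by simp [hx])) (List.nodup_cons.1 hnd).2,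
      lset_def, List.length_set, getD_set_eq, lget_def]
    by_cases hja : j = a.toNat ∧ j < d.length
    · have hji : (j : Int) = a := by omega
      have hjl : ¬ ((j : Int) ∈ l ∧ j < d.length) := fun h => hanl (hji ▸ h.1)
      rw [if_pos hja, if_neg hjl, if_pos ⟨List.mem_cons.2 (Or.inl hji), hja.2⟩, hja.1]
      ring
    · rw [if_neg hja]
      by_cases hjl : (j : Int) ∈ l ∧ j < d.length
      · rw [if_pos hjl, if_pos ⟨List.mem_cons_of_mem a hjl.1, hjl.2⟩]
      · rw [if_neg hjl, if_neg (by
          rintro ⟨hm, hlen⟩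
          rcases List.mem_cons.1 hm with hh | hh
          · exact hja ⟨by omega, hlen⟩
          · exact hjl ⟨hh, hlen⟩)]

lemma g0_getD (N : Int) (j : Nat) (hj : (j : Int) < N + 1) :
    (PySem.List.pyRange 0 (N + 1) 1).getD j 0 = (j : Int) := by
  rw [PySem.List.pyRange_one, PySem.List.getD_map_range _ _ _ _ (by omega)]
  simp

lemma g0_length (N : Int) (hN : 0 ≤ N) :
    (PySem.List.pyRange 0 (N + 1) 1).length = N.toNat + 1 := by
  rw [PySem.List.length_pyRange_one]; omega

lemma mem_sieve_rng (N i : Int) (hi : 2 ≤ i) (j : Nat) (hj : j < N.toNat + 1) (hN : 0 ≤ N) :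
    ((j : Int) ∈ PySem.List.pyRange (i * i) (N + 1) i ↔ (i ∣ (j : Int) ∧ i * i ≤ (j : Int))) := by
  rw [PySem.List.mem_pyRange_iff_of_pos (by omega)]
  constructor
  · rintro ⟨h1, _, h3⟩
    refine ⟨?_, h1⟩
    have : i ∣ (j : Int) - i * i + i * i := dvd_add h3 (Dvd.intro i rfl)
    simpa using this
  · rintro ⟨h1, h2⟩
    exact ⟨h2, by omega, dvd_sub h1 (Dvd.intro i rfl)⟩

lemma gpf_inv (N : Int) (hN : 0 ≤ N) :
    ∀ m : Int, 1 ≤ m →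
    ((((PySem.List.pyRange 2 (m + 1) 1).foldl (sieveStep N)
        (PySem.List.pyRange 0 (N + 1) 1)).length = N.toNat + 1) ∧
     ∀ j : Nat, j < N.toNat + 1 →
       ((((PySem.List.pyRange 2 (m + 1) 1).foldl (sieveStep N)
           (PySem.List.pyRange 0 (N + 1) 1)).getD j 0 = (j : Int)) ∨
         ∃ p : Nat, (((PySem.List.pyRange 2 (m + 1) 1).foldl (sieveStep N)
           (PySem.List.pyRange 0 (N + 1) 1)).getD j 0 = (p : Int)) ∧
           p.Prime ∧ p ∣ j ∧ p * p ≤ j) ∧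
       (∀ p : Nat, p.Prime → (p : Int) ≤ m → p ∣ j → p * p ≤ j →
         (((PySem.List.pyRange 2 (m + 1) 1).foldl (sieveStep N)
           (PySem.List.pyRange 0 (N + 1) 1)).getD j 0 ≠ (j : Int)))) := by
  refine Int.le_induction ?_ ?_
  · -- m = 1 : no pass has run
    rw [PySem.List.pyRange_one_eq_nil (a := 2) (b := 1 + 1) (by omega), List.foldl_nil]
    refine ⟨g0_length N hN, fun j hj => ⟨Or.inl (g0_getD N j (by omega)), ?_⟩⟩
    intro p hp hp1
    exact absurd hp1 (by have := hp.two_le; omega)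
  · rintro m hm ⟨hlen, hI⟩
    rw [PySem.List.pyRange_one_succ_right (a := 2) (b := m + 1) (by omega), List.foldl_append,
      List.foldl_cons, List.foldl_nil]
    set g := (PySem.List.pyRange 2 (m + 1) 1).foldl (sieveStep N)
      (PySem.List.pyRange 0 (N + 1) 1) with hg
    set i : Int := m + 1 with hidef
    have hi2 : 2 ≤ i := by omega
    have hi0 : 0 ≤ i := by omega
    unfold sieveStep
    by_cases hguard : lget g i = i
    · rw [if_pos hguard]
      rw [lget_def] at hguard
      -- the guard forces i ≤ N and i prime
      have hiN : i.toNat < N.toNat + 1 := by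
        by_contra hcon
        rw [List.getD_eq_default _ _ (by omega : g.length ≤ i.toNat)] at hguard
        omega
      have hiprime : i.toNat.Prime := by
        by_contra hnp
        have h2 : 2 ≤ i.toNat := by omega
        have hq := Nat.minFac_prime (n := i.toNat) (by omega)
        have hqd : i.toNat.minFac ∣ i.toNat := Nat.minFac_dvd _
        have hqsq : i.toNat.minFac * i.toNat.minFac ≤ i.toNat := by
          have h := Nat.minFac_sq_le_self (n := i.toNat) (by omega) hnp
          rwa [pow_two] at h
        have hq2 := hq.two_le
        have h2q : 2 * i.toNat.minFac ≤ i.toNat.minFac * i.toNat.minFac :=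
          Nat.mul_le_mul_right _ hq2
        have hqm : (i.toNat.minFac : Int) ≤ m := by omega
        have := (hI i.toNat hiN).2 i.toNat.minFac hq hqm hqd hqsq
        exact this (by rw [hguard]; omega)
      set rng := PySem.List.pyRange (i * i) (N + 1) i with hrng
      have h0 : ∀ x ∈ rng, 0 ≤ x := by
        intro x hx
        rw [hrng, PySem.List.mem_pyRange_iff_of_pos (by omega)] at hx
        nlinarith [hx.1]
      have hmem : ∀ j : Nat, j < N.toNat + 1 →
          ((j : Int) ∈ rng ↔ (i ∣ (j : Int) ∧ i * i ≤ (j : Int))) := fun j hj =>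
        mem_sieve_rng N i hi2 j hj hN
      refine ⟨by rw [foldl_setconst_length]; exact hlen, fun j hj => ?_⟩
      rw [foldl_setconst_getD rng i g j h0]
      by_cases hw : (j : Int) ∈ rng ∧ j < g.length
      · rw [if_pos hw]
        have hdvd : i ∣ (j : Int) := ((hmem j hj).1 hw.1).1
        have hsq : i * i ≤ (j : Int) := ((hmem j hj).1 hw.1).2
        have hidvd : i.toNat ∣ j := by
          have h : (i.toNat : Int) ∣ (j : Int) := by rwa [Int.toNat_of_nonneg hi0]
          exact_mod_cast h
        have hisq : i.toNat * i.toNat ≤ j := by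
          have h : (i.toNat : Int) * (i.toNat : Int) ≤ (j : Int) := by
            rw [Int.toNat_of_nonneg hi0]; exact hsq
          exact_mod_cast h
        refine ⟨Or.inr ⟨i.toNat, by rw [Int.toNat_of_nonneg hi0], hiprime, hidvd, hisq⟩, ?_⟩
        intro p hp hpm hpd hpsq
        have hij : i < (j : Int) := by nlinarith
        omega
      · rw [if_neg hw]
        refine ⟨(hI j hj).1, ?_⟩
        intro p hp hpm hpd hpsq
        rcases lt_or_eq_of_le hpm with hlt | heq
        · exact (hI j hj).2 p hp (by omega) hpd hpsq
        · exfalso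
          apply hw
          refine ⟨(hmem j hj).2 ⟨?_, ?_⟩, by omega⟩
          · rw [← heq]; exact_mod_cast hpd
          · rw [← heq]; exact_mod_cast hpsq
    · rw [if_neg hguard]
      refine ⟨hlen, fun j hj => ⟨(hI j hj).1, ?_⟩⟩
      intro p hp hpm hpd hpsq
      rcases lt_or_eq_of_le hpm with hlt | heq
      · exact (hI j hj).2 p hp (by omega) hpd hpsq
      · -- p = i = m+1 is prime, yet gpf[i] ≠ i: impossible by I1
        exfalso
        have hpi : (p : Int) = i := heq
        have hp2 := hp.two_le
        have hpp : p ≤ p * p := Nat.le_mul_of_pos_left p (by omega)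
        have hiN : i.toNat < N.toNat + 1 := by omega
        rcases (hI i.toNat hiN).1 with h1 | ⟨q, hq1, hq2, hq3, hq4⟩
        · apply hguard
          rw [lget_def, h1]; omega
        · have hqp : q = p := by
            have : i.toNat = p := by omega
            rw [this] at hq3 hq4
            rcases (Nat.Prime.eq_one_or_self_of_dvd hp q hq3) with h | h
            · exact absurd h hq2.one_lt.ne'
            · exact h
          have h2p : 2 * p ≤ p * p := Nat.mul_le_mul_right p hp2
          have hip : i.toNat = p := by omega
          rw [hqp, hip] at hq4
          omega

lemma gpfSieveL_eq (N : Int) (_hN : 0 ≤ N) :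
    gpfSieveL N = (PySem.List.pyRange 2 (max (pySqrtInt N) 1 + 1) 1).foldl (sieveStep N)
      (PySem.List.pyRange 0 (N + 1) 1) := by
  rcases le_or_gt (pySqrtInt N) 1 with h | h
  · have h0 : (0:Int) ≤ pySqrtInt N := by unfold pySqrtInt; positivity
    unfold gpfSieveL sieveStep
    rw [PySem.List.pyRange_one_eq_nil (a := 2) (b := pySqrtInt N + 1) (by omega),
      PySem.List.pyRange_one_eq_nil (a := 2) (b := max (pySqrtInt N) 1 + 1) (by omega)]
  · rw [max_eq_left (by omega)]
    rfl

lemma gpf_final (N : Int) (hN : 0 ≤ N) :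
    (gpfSieveL N).length = N.toNat + 1 ∧
    ∀ j : Nat, j < N.toNat + 1 →
      ((gpfSieveL N).getD j 0 = (j : Int) ∨
        ∃ p : Nat, (gpfSieveL N).getD j 0 = (p : Int) ∧ p.Prime ∧ p ∣ j ∧ p * p ≤ j) ∧
      (∀ p : Nat, p.Prime → p ∣ j → p * p ≤ j → (gpfSieveL N).getD j 0 ≠ (j : Int)) := by
  have h := gpf_inv N hN (max (pySqrtInt N) 1) (le_max_right _ _)
  rw [gpfSieveL_eq N hN]
  refine ⟨h.1, fun j hj => ⟨(h.2 j hj).1, ?_⟩⟩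
  intro p hp hpd hpsq
  refine (h.2 j hj).2 p hp ?_ hpd hpsq
  have hps : p ≤ Nat.sqrt N.toNat := by
    rw [Nat.le_sqrt]
    omega
  have : (p : Int) ≤ pySqrtInt N := by unfold pySqrtInt; exact_mod_cast hps
  exact le_trans this (le_max_left _ _)

lemma gpf_prime (N : Int) (hN : 0 ≤ N) (j : Nat) (hj : j < N.toNat + 1) (hp : j.Prime) :
    (gpfSieveL N).getD j 0 = (j : Int) := by
  rcases ((gpf_final N hN).2 j hj).1 with h | ⟨p, h1, h2, h3, h4⟩
  · exact h
  · rcases (Nat.Prime.eq_one_or_self_of_dvd hp p h3) with h | h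
    · exact absurd h h2.one_lt.ne'
    · subst h
      have := hp.two_le
      nlinarith [h4]

lemma gpf_composite (N : Int) (hN : 0 ≤ N) (j : Nat) (hj : j < N.toNat + 1)
    (h2 : 2 ≤ j) (hnp : ¬ j.Prime) :
    ∃ p : Nat, (gpfSieveL N).getD j 0 = (p : Int) ∧ p.Prime ∧ p ∣ j ∧ p * p ≤ j ∧
      (gpfSieveL N).getD j 0 ≠ (j : Int) := by
  have hq := Nat.minFac_prime (n := j) (by omega)
  have hqd : j.minFac ∣ j := Nat.minFac_dvd _
  have hqsq : j.minFac * j.minFac ≤ j := by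
    have h := Nat.minFac_sq_le_self (n := j) (by omega) hnp
    rwa [pow_two] at h
  have hne := ((gpf_final N hN).2 j hj).2 j.minFac hq hqd hqsq
  rcases ((gpf_final N hN).2 j hj).1 with h | ⟨p, h1, h2', h3, h4⟩
  · exact absurd h hne
  · exact ⟨p, h1, h2', h3, h4, hne⟩

def tauI (j : Nat) : Int := (j.divisors.card : Int)

lemma whileDiv_spec (p : Nat) (hp : 2 ≤ p) :
    ∀ fuel t : Nat, 1 ≤ t → t ≤ fuel → ∀ e : Int,
      ∃ a t' : Nat, whileDiv fuel (p : Int) e (t : Int) = (e + (a : Int), (t' : Int)) ∧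
        t = t' * p ^ a ∧ ¬ p ∣ t' ∧ 1 ≤ t' := by
  intro fuel
  induction fuel with
  | zero => intro t h1 h2 e; omega
  | succ fuel ih =>
    intro t h1 h2 e
    by_cases hd : p ∣ t
    · have hm : PySem.Int.mod (t : Int) (p : Int) = 0 :=
        (PySem.Int.mod_eq_zero_iff_dvd _ _).2 (by exact_mod_cast hd)
      have hfl : PySem.Int.floordiv (t : Int) (p : Int) = ((t / p : Nat) : Int) :=
        PySem.Int.floordiv_natCast t p
      have htp1 : 1 ≤ t / p := Nat.one_le_div_iff (by omega) |>.2 (Nat.le_of_dvd (by omega) hd)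
      have htpf : t / p ≤ fuel := by
        have := Nat.div_lt_self (by omega : 0 < t) (by omega : 1 < p)
        omega
      obtain ⟨a, t', heq, hfact, hnd, ht'⟩ := ih (t / p) htp1 htpf (e + 1)
      refine ⟨a + 1, t', ?_, ?_, hnd, ht'⟩
      · show whileDiv (fuel + 1) (p : Int) e (t : Int) = _
        rw [whileDiv, if_pos hm, hfl, heq]
        have : e + 1 + (a : Int) = e + ((a : Nat) + 1 : Nat) := by push_cast; ring
        rw [this]
      · have : t = (t / p) * p := (Nat.div_mul_cancel hd).symm
        rw [this, hfact]
        ring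
    · have hm : ¬ PySem.Int.mod (t : Int) (p : Int) = 0 := fun h =>
        hd (by exact_mod_cast (PySem.Int.mod_eq_zero_iff_dvd _ _).1 h)
      refine ⟨0, t, ?_, by simp, hd, h1⟩
      rw [whileDiv, if_neg hm]
      simp

lemma tau_mul_prime_pow (p t' a : Nat) (hp : p.Prime) (hnd : ¬ p ∣ t') (_ht : 1 ≤ t') :
    tauI (t' * p ^ (a + 1)) = tauI t' * ((a : Int) + 2) := by
  have hcop : (p ^ (a + 1)).Coprime t' := (Nat.Prime.coprime_iff_not_dvd hp).2 hnd |>.pow_left _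
  have h1 : (p ^ (a + 1) * t').divisors.card = (p ^ (a + 1)).divisors.card * t'.divisors.card :=
    Nat.Coprime.card_divisors_mul hcop
  have h2 : (p ^ (a + 1)).divisors.card = a + 2 := by
    rw [Nat.divisors_prime_pow hp, Finset.card_map, Finset.card_range]
  unfold tauI
  rw [mul_comm t' (p ^ (a + 1)), h1, h2]
  push_cast
  ring


-- A's divisor-count DP loop body, named for the proofs
def dpStep : List Int → Int → List Int :=
  fun d i =>
    if lget d i = i then lset d i 2
    else
      lset d i
        (lget d
            (whileDiv ((PySem.Int.floordiv i (lget d i)).toNat + 1)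
              (lget d i) 2 (PySem.Int.floordiv i (lget d i))).2
          * (whileDiv ((PySem.Int.floordiv i (lget d i)).toNat + 1)
              (lget d i) 2 (PySem.Int.floordiv i (lget d i))).1)

def countFold (d : List Int) (b : Int) : Int :=
  (PySem.List.pyRange 0 b 1).foldl
    (fun count z =>
      if lget d z = lget d (z + 1) then count + 1 else count) 0

lemma dpStep_toList (a : Array Int) (x : Int) :
    ((fun (d : Array Int) (i : Int) =>
        if aget d i = i then aset d i 2
        else
          let p := aget d i
          let t0 := PySem.Int.floordiv i p
          let et := whileDiv (t0.toNat + 1) p 2 t0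
          aset d i (aget d et.2 * et.1)) a x).toList = dpStep a.toList x := by
  show _ = dpStep a.toList x
  unfold dpStep
  simp only [aget_toList]
  by_cases hg : lget a.toList x = x
  · rw [if_pos hg, if_pos hg, aset_toList]
  · rw [if_neg hg, if_neg hg, aset_toList]

lemma compute_unfold (limit : Int) :
    compute limit = countFold
      ((PySem.List.pyRange 2 (limit + 2) 1).foldl dpStep (gpfSieveL (limit + 1))) (limit - 1) := by
  unfold compute countFold
  have hd := foldl_toList (PySem.List.pyRange 2 (limit + 2) 1) _ dpStep
    (fun a x _ => dpStep_toList a x) (gpfSieve (limit + 1))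
  rw [gpfSieve_toList] at hd
  apply PySem.List.foldl_congr_mem
  intro acc z _
  rw [aget_toList, aget_toList, hd]

def bStep (size : Int) : List Int → Int → List Int :=
  fun d i =>
    (PySem.List.pyRange i size i).foldl
      (fun d j => lset d j (lget d j + 1)) d

lemma bStep_toList (size : Int) (a : Array Int) (x : Int) :
    ((fun (d : Array Int) (i : Int) =>
        (PySem.List.pyRange i size i).foldl
          (fun d j => aset d j (aget d j + 1)) d) a x).toList = bStep size a.toList x := by
  show _ = bStep size a.toList x
  unfold bStep
  refine Eq.trans (foldl_toList _ _ _ (fun b y _ => ?_) a) rfl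
  rw [aset_toList, aget_toList]

lemma compute_alt_unfold (limit : Int) :
    compute_alt limit = countFold
      ((PySem.List.pyRange 1 (if limit > 0 then limit else 0) 1).foldl
        (bStep (if limit > 0 then limit else 0))
        (List.replicate (if limit > 0 then limit else 0).toNat 0)) (limit - 1) := by
  unfold compute_alt countFold
  have hd := foldl_toList (PySem.List.pyRange 1 (if limit > 0 then limit else 0) 1) _
    (bStep (if limit > 0 then limit else 0))
    (fun a x _ => bStep_toList (if limit > 0 then limit else 0) a x)
    (Array.replicate (if limit > 0 then limit else 0).toNat 0)
  rw [Array.toList_replicate] at hd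
  apply PySem.List.foldl_congr_mem
  intro acc z _
  rw [aget_toList, aget_toList, hd]

lemma tauI_zero : tauI 0 = 0 := by simp [tauI]
lemma tauI_one : tauI 1 = 1 := by simp [tauI]
lemma tauI_prime (j : Nat) (hp : j.Prime) : tauI j = 2 := by
  unfold tauI
  rw [hp.divisors, Finset.card_pair hp.one_lt.ne]
  rfl

lemma nodup_pyRange_pos (a b s : Int) (hs : 0 < s) : (PySem.List.pyRange a b s).Nodup := by
  rw [PySem.List.pyRange_of_pos a b hs]
  refine List.Nodup.map ?_ (List.nodup_range)
  intro x y hxy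
  have h1 : s * (x : Int) = s * (y : Int) := by linarith
  have h2 : (x : Int) = (y : Int) := mul_left_cancel₀ (by omega) h1
  exact_mod_cast h2

lemma dp_inv (N : Int) (hN : 0 ≤ N) :
    ∀ m : Int, 1 ≤ m → m ≤ N →
      ((((PySem.List.pyRange 2 (m + 1) 1).foldl dpStep (gpfSieveL N)).length = N.toNat + 1) ∧
       (∀ j : Nat, (j : Int) ≤ m →
         ((PySem.List.pyRange 2 (m + 1) 1).foldl dpStep (gpfSieveL N)).getD j 0 = tauI j) ∧
       (∀ j : Nat, m < (j : Int) → j < N.toNat + 1 →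
         ((PySem.List.pyRange 2 (m + 1) 1).foldl dpStep (gpfSieveL N)).getD j 0
           = (gpfSieveL N).getD j 0)) := by
  refine Int.le_induction ?_ ?_
  · intro hmN
    rw [PySem.List.pyRange_one_eq_nil (a := 2) (b := 1 + 1) (by omega), List.foldl_nil]
    refine ⟨(gpf_final N hN).1, ?_, fun j hj1 hj2 => rfl⟩
    intro j hj
    have hj1 : j ≤ 1 := by exact_mod_cast hj
    interval_cases j
    · rcases ((gpf_final N hN).2 0 (by omega)).1 with h | ⟨p, h1, h2, h3, h4⟩
      · rw [h, tauI_zero]; rfl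
      · have h5 := h2.two_le
        have h6 : 0 < p * p := Nat.mul_pos (by omega) (by omega)
        omega
    · rcases ((gpf_final N hN).2 1 (by omega)).1 with h | ⟨p, h1, h2, h3, h4⟩
      · rw [h, tauI_one]; rfl
      · have h5 := h2.two_le
        have h6 : p = 1 := Nat.dvd_one.1 h3
        omega
  · intro m hm ih hmN
    obtain ⟨hlen, hval, huntouched⟩ := ih (by omega)
    rw [PySem.List.pyRange_one_succ_right (a := 2) (b := m + 1) (by omega), List.foldl_append,
      List.foldl_cons, List.foldl_nil]
    set dm := (PySem.List.pyRange 2 (m + 1) 1).foldl dpStep (gpfSieveL N) with hdm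
    set i : Int := m + 1 with hidef
    have hi0 : 0 ≤ i := by omega
    have hiN : i.toNat < N.toNat + 1 := by omega
    have hcasti : ((i.toNat : Nat) : Int) = i := Int.toNat_of_nonneg hi0
    have hgd : dm.getD i.toNat 0 = (gpfSieveL N).getD i.toNat 0 :=
      huntouched i.toNat (by omega) hiN
    unfold dpStep
    rw [lget_def]
    by_cases hguard : dm.getD i.toNat 0 = i
    · rw [if_pos hguard]
      have hprime : i.toNat.Prime := by
        by_contra hnp
        obtain ⟨p, h1, h2, h3, h4, hne⟩ := gpf_composite N hN i.toNat hiN (by omega) hnp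
        exact hne (by rw [← hgd, hguard]; exact hcasti.symm)
      rw [lset_def]
      refine ⟨by rw [List.length_set]; exact hlen, ?_, ?_⟩
      · intro j hj
        rw [getD_set_eq]
        by_cases hji : j = i.toNat ∧ j < dm.length
        · rw [if_pos hji, hji.1, tauI_prime _ hprime]
        · have hjne : j ≠ i.toNat := fun he => hji ⟨he, by omega⟩
          rw [if_neg hji]
          exact hval j (by omega)
      · intro j hj1 hj2
        rw [getD_set_eq, if_neg (by rintro ⟨he, _⟩; omega)]
        exact huntouched j (by omega) hj2
    · rw [if_neg hguard]
      have hnp : ¬ i.toNat.Prime := by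
        intro hp
        exact hguard (by rw [hgd, gpf_prime N hN i.toNat hiN hp]; exact hcasti)
      obtain ⟨p, hgp, hpp, hpd, hpsq, _⟩ := gpf_composite N hN i.toNat hiN (by omega) hnp
      have hp2 := hpp.two_le
      have hpv : dm.getD i.toNat 0 = (p : Int) := by rw [hgd, hgp]
      rw [hpv]
      have hfl : PySem.Int.floordiv i (p : Int) = ((i.toNat / p : Nat) : Int) := by
        rw [← hcasti]; exact PySem.Int.floordiv_natCast i.toNat p
      rw [hfl]
      have htn1 : 1 ≤ i.toNat / p :=
        (Nat.one_le_div_iff (by omega)).2 (Nat.le_of_dvd (by omega) hpd)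
      rw [Int.toNat_natCast]
      obtain ⟨a, t', hwd, hfact, hndvd, ht'1⟩ :=
        whileDiv_spec p hp2 (i.toNat / p + 1) (i.toNat / p) htn1 (by omega) 2
      rw [hwd]
      have hit : i.toNat = t' * p ^ (a + 1) := by
        have h1 : i.toNat = (i.toNat / p) * p := (Nat.div_mul_cancel hpd).symm
        rw [h1, hfact]; ring
      have hppow : 2 ≤ p ^ (a + 1) := le_trans hp2 (Nat.le_self_pow (by omega) p)
      have ht'lt : ((t' : Nat) : Int) ≤ m := by
        have h2t : t' * 2 ≤ t' * p ^ (a + 1) := Nat.mul_le_mul_left t' hppow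
        omega
      have hvt : dm.getD t' 0 = tauI t' := hval t' ht'lt
      have hsnd : ((2 + (a : Int), ((t' : Nat) : Int)) : Int × Int).2 = ((t' : Nat) : Int) := rfl
      have hfst : ((2 + (a : Int), ((t' : Nat) : Int)) : Int × Int).1 = 2 + (a : Int) := rfl
      rw [hsnd, hfst, lget_def, Int.toNat_natCast, hvt, lset_def]
      have hval_i : tauI t' * (2 + (a : Int)) = tauI i.toNat := by
        rw [hit, tau_mul_prime_pow p t' a hpp hndvd ht'1]; ring
      refine ⟨by rw [List.length_set]; exact hlen, ?_, ?_⟩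
      · intro j hj
        rw [getD_set_eq]
        by_cases hji : j = i.toNat ∧ j < dm.length
        · rw [if_pos hji, hji.1]
          exact hval_i
        · have hjne : j ≠ i.toNat := fun he => hji ⟨he, by omega⟩
          rw [if_neg hji]
          exact hval j (by omega)
      · intro j hj1 hj2
        rw [getD_set_eq, if_neg (by rintro ⟨he, _⟩; omega)]
        exact huntouched j (by omega) hj2

lemma bsieve_inv (size : Int) (hs : 1 ≤ size) :
    ∀ m : Int, 1 ≤ m → m ≤ size →
      ((((PySem.List.pyRange 1 m 1).foldl (bStep size)
          (List.replicate size.toNat 0)).length = size.toNat) ∧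
       (((PySem.List.pyRange 1 m 1).foldl (bStep size)
          (List.replicate size.toNat 0)).getD 0 0 = 0) ∧
       ∀ j : Nat, 1 ≤ j → j < size.toNat →
         ((PySem.List.pyRange 1 m 1).foldl (bStep size)
           (List.replicate size.toNat 0)).getD j 0
           = (((Finset.Ico 1 m.toNat).filter (· ∣ j)).card : Int)) := by
  refine Int.le_induction ?_ ?_
  · intro hms
    rw [PySem.List.pyRange_one_eq_nil (a := 1) (b := 1) le_rfl, List.foldl_nil]
    refine ⟨by simp, by simp, ?_⟩
    intro j hj1 hj2
    simp
  · intro m hm ih hms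
    obtain ⟨hlen, h0, hval⟩ := ih (by omega)
    rw [PySem.List.pyRange_one_succ_right (a := 1) (b := m) (by omega), List.foldl_append,
      List.foldl_cons, List.foldl_nil]
    set dm := (PySem.List.pyRange 1 m 1).foldl (bStep size)
      (List.replicate size.toNat 0) with hdm
    unfold bStep
    have hsm : (0:Int) < m := by omega
    have hnodup := nodup_pyRange_pos m size m hsm
    have hpos : ∀ x ∈ PySem.List.pyRange m size m, 0 ≤ x := fun x hx => by
      rw [PySem.List.mem_pyRange_iff_of_pos hsm] at hx; omega
    have hmt : ((m.toNat : Nat) : Int) = m := Int.toNat_of_nonneg (by omega)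
    refine ⟨by rw [foldl_incr_length]; exact hlen, ?_, ?_⟩
    · rw [foldl_incr_getD _ _ 0 hpos hnodup]
      have hnm : ¬ (((0:Nat) : Int) ∈ PySem.List.pyRange m size m ∧ (0:Nat) < dm.length) := by
        rintro ⟨hmem, _⟩
        rw [PySem.List.mem_pyRange_iff_of_pos hsm] at hmem
        push_cast at hmem
        omega
      rw [if_neg hnm, add_zero]
      exact h0
    · intro j hj1 hj2
      rw [foldl_incr_getD _ _ j hpos hnodup, hval j hj1 hj2]
      have hjlen : j < dm.length := by omega
      have hmem : (((j:Nat) : Int) ∈ PySem.List.pyRange m size m ∧ j < dm.length) ↔ m.toNat ∣ j := by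
        rw [PySem.List.mem_pyRange_iff_of_pos hsm]
        constructor
        · rintro ⟨⟨hle, _, hdvd⟩, _⟩
          have hd2 : m ∣ (j : Int) := by
            have h := dvd_add hdvd (dvd_refl m)
            simpa using h
          rw [← hmt] at hd2
          exact_mod_cast hd2
        · intro hdvd
          have hle : m.toNat ≤ j := Nat.le_of_dvd (by omega) hdvd
          have hdi : m ∣ (j : Int) := by
            rw [← hmt]; exact_mod_cast hdvd
          exact ⟨⟨by omega, by omega, dvd_sub hdi (dvd_refl m)⟩, hjlen⟩
      have hmn1 : (m + 1).toNat = m.toNat + 1 := by omega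
      rw [hmn1, Nat.Ico_succ_right_eq_insert_Ico (by omega : 1 ≤ m.toNat),
        Finset.filter_insert]
      by_cases hdvd : m.toNat ∣ j
      · rw [if_pos (hmem.2 hdvd), if_pos hdvd,
          Finset.card_insert_of_notMem (by simp)]
        push_cast
        ring
      · rw [if_neg (fun hc => hdvd (hmem.1 hc)), if_neg hdvd, add_zero]

lemma bsieve_tau (size : Int) (hs : 1 ≤ size) (j : Nat) (hj : j < size.toNat) :
    ((PySem.List.pyRange 1 size 1).foldl (bStep size)
      (List.replicate size.toNat 0)).getD j 0 = tauI j := by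
  obtain ⟨hlen, h0, hval⟩ := bsieve_inv size hs size (by omega) le_rfl
  rcases Nat.eq_zero_or_pos j with hj0 | hj1
  · subst hj0
    rw [h0, tauI_zero]
  · rw [hval j hj1 hj]
    unfold tauI
    congr 1
    congr 1
    ext x
    simp only [Finset.mem_filter, Finset.mem_Ico, Nat.mem_divisors]
    constructor
    · rintro ⟨⟨h1, h2⟩, h3⟩
      exact ⟨h3, by omega⟩
    · rintro ⟨h1, h2⟩
      have hx1 : 1 ≤ x := Nat.pos_of_dvd_of_pos h1 (by omega)
      have hx2 : x ≤ j := Nat.le_of_dvd (by omega) h1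
      exact ⟨⟨hx1, by omega⟩, h1⟩

lemma compute_eq_of_small (limit : Int) (h : limit ≤ 1) : compute limit = 0 := by
  rw [compute_unfold]
  unfold countFold
  rw [PySem.List.pyRange_one_eq_nil (a := 0) (b := limit - 1) (by omega), List.foldl_nil]

lemma compute_alt_eq_of_small (limit : Int) (h : limit ≤ 1) : compute_alt limit = 0 := by
  rw [compute_alt_unfold]
  unfold countFold
  rw [PySem.List.pyRange_one_eq_nil (a := 0) (b := limit - 1) (by omega), List.foldl_nil]

lemma main_eq (limit : Int) (h : 2 ≤ limit) : compute limit = compute_alt limit := by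
  rw [compute_unfold, compute_alt_unfold, if_pos (by omega : limit > 0)]
  have hN : (0:Int) ≤ limit + 1 := by omega
  obtain ⟨hlenA, hvalA, _⟩ := dp_inv (limit + 1) hN (limit + 1) (by omega) le_rfl
  have hb : limit + 2 = (limit + 1) + 1 := by ring
  rw [hb]
  unfold countFold
  apply PySem.List.foldl_congr_mem
  intro acc z hz
  rw [PySem.List.mem_pyRange_one] at hz
  have hz0 : 0 ≤ z := hz.1
  have hz1 : z < limit - 1 := hz.2
  rw [lget_def, lget_def, lget_def, lget_def]
  have hA1 : ((PySem.List.pyRange 2 ((limit + 1) + 1) 1).foldl dpStep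
      (gpfSieveL (limit + 1))).getD z.toNat 0 = tauI z.toNat := hvalA z.toNat (by omega)
  have hA2 : ((PySem.List.pyRange 2 ((limit + 1) + 1) 1).foldl dpStep
      (gpfSieveL (limit + 1))).getD (z + 1).toNat 0 = tauI (z + 1).toNat :=
    hvalA (z + 1).toNat (by omega)
  have hB1 : ((PySem.List.pyRange 1 limit 1).foldl (bStep limit)
      (List.replicate limit.toNat 0)).getD z.toNat 0 = tauI z.toNat :=
    bsieve_tau limit (by omega) z.toNat (by omega)
  have hB2 : ((PySem.List.pyRange 1 limit 1).foldl (bStep limit)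
      (List.replicate limit.toNat 0)).getD (z + 1).toNat 0 = tauI (z + 1).toNat :=
    bsieve_tau limit (by omega) (z + 1).toNat (by omega)
  rw [hA1, hA2, hB1, hB2]

-- ===== VERDICT (by name: the statement is the Claim_ definition above) =====
theorem compute_spec : Claim_equal_compute := by
  intro limit _ _
  unfold Spec_compute
  by_cases h : limit ≤ 1
  · rw [compute_eq_of_small limit h, compute_alt_eq_of_small limit h]
  · exact main_eq limit (by omega)
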